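-- pv_equiv track=rewrite | github.com/Shiakaron/foo.bar | level_two_part1.py | solution
-- ===== SOURCE A (Python) =====
-- def solution(str):
--     """
--     return the number of salutes of minions walking along the hallway
--     "-" empty part of hallway
--     ">" minion moving right
--     "<" minion moving left
--
--     1: remove all "-" from string because they are redudant
--     2: count the total minions moving left, mleft
--     3: iterate over the string to count the number of mlefts a minion moving right will encounter
--         a. every time you find a minion moving left, subtract it from the number of mlefts
--         b. every time you find a minion moving right, add to the salutes the minions moving left
--     """
--     salutes = 0
--     str = str.replace("-","")
--     mleft = str.count("<")
--     for minion in str: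
--         if minion == "<":
--             mleft -= 1
--         else:
--             salutes += mleft
--     return salutes*2
-- ===== SOURCE B (Python) =====
-- def solution(str):
--     # One forward pass: each left-mover salutes every walker already seen
--     # moving right; no pre-count pass, no replace().
--     walkers = 0
--     salutes = 0
--     for c in str:
--         if c == "<":
--             salutes += walkers
--         elif c != "-":
--             walkers += 1
--     return salutes * 2
-- ===== Notes on version B (the rewrite author's own statement) =====
-- stated objective: simpler
-- what changed: B replaces A's replace()-pass plus count()-pass plus decrementing scan with a single forward pass that accumulates right-movers seen so far and credits them at each left-mover.
import Mathlib
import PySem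

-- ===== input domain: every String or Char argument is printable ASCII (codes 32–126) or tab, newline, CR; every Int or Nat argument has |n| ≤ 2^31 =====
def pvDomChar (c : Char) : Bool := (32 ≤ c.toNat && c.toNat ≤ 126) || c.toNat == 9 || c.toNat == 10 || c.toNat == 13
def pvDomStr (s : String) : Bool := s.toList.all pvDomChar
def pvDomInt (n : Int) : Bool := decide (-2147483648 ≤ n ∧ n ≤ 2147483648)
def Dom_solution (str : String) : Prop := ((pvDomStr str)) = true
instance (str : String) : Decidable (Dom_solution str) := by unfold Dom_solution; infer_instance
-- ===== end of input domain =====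

-- B replaces A's three-pass scheme (replace "-", count "<", decrementing scan) by one
-- forward accumulation pass; same return value on every input (simpler, not faster).

-- ===== PORT A =====
-- loop body of A's for-loop: '<' decrements mleft, anything else adds mleft to salutes
def aStep (st : Int × Int) (minion : Char) : Int × Int :=
  if minion = '<' then (st.1 - 1, st.2) else (st.1, st.2 + st.1)

def solution (str : String) : Int :=
  let s2 := PySem.Str.replace str "-" ""        -- str = str.replace("-","")
  let mleft : Int := (PySem.Str.count s2 "<" : Int)  -- mleft = str.count("<")
  let res := s2.toList.foldl aStep (mleft, 0)   -- for minion in str: …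
  res.2 * 2                                     -- return salutes*2

-- ===== PORT B =====
-- loop body of B's single pass: '<' collects walkers, non-'-' increments walkers
def bStep (st : Int × Int) (c : Char) : Int × Int :=
  if c = '<' then (st.1, st.2 + st.1)
  else if c ≠ '-' then (st.1 + 1, st.2) else st

def solution_alt (str : String) : Int :=
  let res := str.toList.foldl bStep (0, 0)
  res.2 * 2

-- ===== PRECONDITION & SPEC =====
def Spec_solution (str : String) (out : Int) : Prop := out = solution_alt str
instance (str : String) (out : Int) : Decidable (Spec_solution str out) := by unfold Spec_solution; infer_instance

-- ===== CLAIM (what is proved, stated in full; the proofs are below) =====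
def Claim_equal_solution : Prop := ∀ (str : String), Dom_solution str → Spec_solution str (solution str)

-- ===== LEMMAS AND PROOFS =====

-- Int-valued counts of '<' and of non-'<' characters in a list.
def cntL : List Char → Int
  | [] => 0
  | c :: l => (if c = '<' then 1 else 0) + cntL l

def cntR : List Char → Int
  | [] => 0
  | c :: l => (if c = '<' then 0 else 1) + cntR l

-- replace(s, "-", "") with a single-char pattern is filtering that char out.
theorem replaceGo_dash (fuel : Nat) (l acc : List Char) (h : l.length ≤ fuel) :
    PySem.Chars.replace.go ['-'] [] fuel l acc = acc.reverse ++ l.filter (· ≠ '-') := by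
  induction fuel generalizing l acc with
  | zero =>
    cases l with
    | nil => simp [PySem.Chars.replace.go]
    | cons c t => simp at h
  | succ n ih =>
    cases l with
    | nil => simp [PySem.Chars.replace.go]
    | cons c t =>
      simp only [PySem.Chars.replace.go]
      by_cases hc : c = '-'
      · subst hc
        rw [if_pos (by simp [List.isPrefixOf])]
        simp only [List.length_singleton, List.drop_one, List.tail_cons,
          List.reverse_nil, List.nil_append]
        rw [ih t acc (by simpa using h)]
        simp
      · rw [if_neg (by simp [List.isPrefixOf]; exact fun h => hc h.symm)]
        rw [ih t (c :: acc) (by simpa using Nat.le_of_succ_le_succ h)]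
        simp [hc]

theorem replace_dash (s : String) :
    (PySem.Str.replace s "-" "").toList = s.toList.filter (· ≠ '-') := by
  rw [PySem.Str.toList_replace]
  show PySem.Chars.replace s.toList ['-'] [] = _
  unfold PySem.Chars.replace
  rw [if_neg (by simp)]
  simpa using replaceGo_dash s.toList.length s.toList [] le_rfl

-- count(s, "<") with a single-char pattern counts that char.
theorem countGo_lt (fuel : Nat) (l : List Char) (acc : Nat) (h : l.length ≤ fuel) :
    PySem.Chars.count.go ['<'] fuel l acc = acc + l.count '<' := by
  induction fuel generalizing l acc with
  | zero =>
    cases l with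
    | nil => simp [PySem.Chars.count.go]
    | cons c t => simp at h
  | succ n ih =>
    cases l with
    | nil => simp [PySem.Chars.count.go]
    | cons c t =>
      simp only [PySem.Chars.count.go]
      by_cases hc : c = '<'
      · subst hc
        rw [if_pos (by simp [List.isPrefixOf])]
        simp only [List.length_singleton, List.drop_one, List.tail_cons]
        rw [ih t (acc + 1) (by simpa using h)]
        simp
        omega
      · rw [if_neg (by simp [List.isPrefixOf]; exact fun h => hc h.symm)]
        rw [ih t acc (by simpa using Nat.le_of_succ_le_succ h)]
        simp [hc]

theorem count_lt (s : String) :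
    ((PySem.Str.count s "<" : Nat) : Int) = cntL s.toList := by
  rw [PySem.Str.count_eq]
  show ((PySem.Chars.count s.toList ['<'] : Nat) : Int) = _
  unfold PySem.Chars.count
  rw [if_neg (by simp)]
  rw [countGo_lt s.toList.length s.toList 0 le_rfl]
  induction s.toList with
  | nil => simp [cntL]
  | cons c t ih =>
    simp only [List.count_cons, cntL]
    by_cases hc : c = '<' <;> simp [hc] at ih ⊢ <;> omega

-- B's pass ignores '-' characters: folding over the filtered list is the same.
theorem bFold_filter (l : List Char) (st : Int × Int) :
    (l.filter (· ≠ '-')).foldl bStep st = l.foldl bStep st := by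
  induction l generalizing st with
  | nil => rfl
  | cons c t ih =>
    by_cases hc : c = '-'
    · subst hc
      have h1 : List.filter (fun x => decide (x ≠ '-')) ('-' :: t)
          = List.filter (fun x => decide (x ≠ '-')) t := by simp
      have h2 : bStep st '-' = st := by simp [bStep]
      rw [h1, ih, List.foldl_cons, h2]
    · have h1 : List.filter (fun x => decide (x ≠ '-')) (c :: t)
          = c :: List.filter (fun x => decide (x ≠ '-')) t := by simp [hc]
      rw [h1, List.foldl_cons, List.foldl_cons, ih]

-- Core accounting identity: A's decrementing scan vs B's accumulating scan,
-- on a dash-free list, with fully generalized starting state.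
theorem core (l : List Char) (h : '-' ∉ l) (m r s t : Int) :
    (l.foldl aStep (cntL l + m, s)).2 + r * cntL l + t
      = (l.foldl bStep (r, t)).2 + s + m * cntR l := by
  induction l generalizing m r s t with
  | nil => simp [cntL, cntR]; ring
  | cons c l ih =>
    have hl : '-' ∉ l := fun hm => h (List.mem_cons_of_mem _ hm)
    have hcd : c ≠ '-' := fun hd => h (hd ▸ List.mem_cons_self)
    by_cases hc : c = '<'
    · subst hc
      have e1 : cntL ('<' :: l) = 1 + cntL l := by simp [cntL]
      have e2 : cntR ('<' :: l) = cntR l := by simp [cntR]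
      have ha : aStep (cntL ('<' :: l) + m, s) '<' = (cntL l + m, s) := by
        show (cntL ('<' :: l) + m - 1, s) = (cntL l + m, s)
        rw [e1]
        congr 1
        ring
      have hb : bStep (r, t) '<' = (r, t + r) := by simp [bStep]
      rw [List.foldl_cons, List.foldl_cons, ha, hb, e1, e2]
      linear_combination ih hl m r s (t + r)
    · have e1 : cntL (c :: l) = cntL l := by simp [cntL, hc]
      have e2 : cntR (c :: l) = 1 + cntR l := by simp [cntR, hc]
      have ha : aStep (cntL (c :: l) + m, s) c = (cntL l + m, s + (cntL l + m)) := by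
        simp only [aStep, if_neg hc, e1]
      have hb : bStep (r, t) c = (r + 1, t) := by simp [bStep, hc, hcd]
      rw [List.foldl_cons, List.foldl_cons, ha, hb, e1, e2]
      linear_combination ih hl m (r + 1) (s + (cntL l + m)) t

-- ===== VERDICT (by name: the statement is the Claim_ definition above) =====
theorem solution_spec : Claim_equal_solution := by
  intro str _
  unfold Spec_solution solution solution_alt
  simp only []
  rw [← bFold_filter]
  rw [replace_dash, count_lt]
  have hmem : '-' ∉ str.toList.filter (· ≠ '-') := by
    intro hm
    have := List.of_mem_filter hm
    simp at this
  have hcnt : cntL (PySem.Str.replace str "-" "").toList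
      = cntL (str.toList.filter (· ≠ '-')) := by rw [replace_dash]
  have h := core (str.toList.filter (· ≠ '-')) hmem 0 0 0 0
  simp only [add_zero, zero_mul] at h
  rw [hcnt, h]
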